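-- pv_equiv track=rewrite | github.com/koii-network/prometheus-beta | src/even_sum_odd_product.py | calculate_even_sum_odd_product
-- ===== SOURCE A (Python) =====
-- def calculate_even_sum_odd_product(numbers):
--     """
--     Calculate the sum of even numbers and the product of odd numbers in the input array.
--
--     Args:
--         numbers (list): A list of integers
--
--     Returns:
--         tuple: A tuple containing (sum of even numbers, product of odd numbers)
--
--     Raises:
--         TypeError: If input is not a list
--         ValueError: If list contains non-integer elements
--     """
--     # Validate input is a list
--     if not isinstance(numbers, list):
--         raise TypeError("Input must be a list of integers")
--
--     # Validate all elements are integers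
--     if not all(isinstance(num, int) for num in numbers):
--         raise ValueError("All elements must be integers")
--
--     # Calculate sum of even numbers
--     even_sum = sum(num for num in numbers if num % 2 == 0)
--
--     # Calculate product of odd numbers
--     # Handle empty list of odd numbers by returning 1 (multiplicative identity)
--     odd_product = 1
--     odd_numbers = [num for num in numbers if num % 2 != 0]
--
--     if odd_numbers:
--         odd_product = 1
--         for num in odd_numbers:
--             odd_product *= num
--
--     return even_sum, odd_product
-- ===== SOURCE B (Python) =====
-- def calculate_even_sum_odd_product(numbers):
--     if not isinstance(numbers, list):
--         raise TypeError("Input must be a list of integers")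
--     if not all(isinstance(num, int) for num in numbers):
--         raise ValueError("All elements must be integers")
--     return _conquer(numbers)
--
--
-- def _conquer(xs):
--     # Divide and conquer: split at the midpoint, solve each half,
--     # combine componentwise (sums add, products multiply).
--     if not xs:
--         return (0, 1)
--     if len(xs) == 1:
--         num = xs[0]
--         return (num, 1) if num % 2 == 0 else (0, num)
--     mid = len(xs) // 2
--     s1, p1 = _conquer(xs[:mid])
--     s2, p2 = _conquer(xs[mid:])
--     return (s1 + s2, p1 * p2)
-- ===== Notes on version B (the rewrite author's own statement) =====
-- stated objective: alternative
-- what changed: Replaced the two filtered linear passes (even-sum comprehension plus odd-list comprehension with a product loop) by a divide-and-conquer recursion that splits the list at its midpoint, solves each half, and combines (s1+s2, p1*p2); correct because + and * are associative and commutative.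
import Mathlib
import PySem

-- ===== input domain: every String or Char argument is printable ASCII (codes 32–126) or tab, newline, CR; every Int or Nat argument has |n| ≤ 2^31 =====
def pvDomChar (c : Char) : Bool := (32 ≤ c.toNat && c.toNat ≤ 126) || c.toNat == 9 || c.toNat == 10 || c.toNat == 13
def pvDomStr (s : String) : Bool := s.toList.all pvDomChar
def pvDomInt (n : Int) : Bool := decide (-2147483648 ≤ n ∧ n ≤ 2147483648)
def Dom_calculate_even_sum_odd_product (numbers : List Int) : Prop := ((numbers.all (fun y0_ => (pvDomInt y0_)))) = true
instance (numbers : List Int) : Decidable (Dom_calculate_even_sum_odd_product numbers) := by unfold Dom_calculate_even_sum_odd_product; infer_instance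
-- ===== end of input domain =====

-- B replaces A's two filtered passes by a midpoint divide-and-conquer recursion (alternative decomposition, not faster).

-- ===== PORT A =====
-- A: sum of a filtered comprehension, then a product loop over the odd-numbers comprehension.
def calculate_even_sum_odd_product (numbers : List Int) : Int × Int :=
  let even_sum := (numbers.filter (fun num => PySem.Int.mod num 2 == 0)).foldl (· + ·) 0
  let odd_numbers := numbers.filter (fun num => PySem.Int.mod num 2 != 0)
  let odd_product :=
    if odd_numbers ≠ [] then odd_numbers.foldl (fun acc num => acc * num) 1 else 1
  (even_sum, odd_product)

-- ===== PORT B =====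
-- B helper: split at the midpoint, solve halves, combine componentwise.
def pvConquer : List Int → Int × Int
  | [] => (0, 1)
  | [num] => if PySem.Int.mod num 2 == 0 then (num, 1) else (0, num)
  | a :: b :: rest =>
    let xs := a :: b :: rest
    let mid := xs.length / 2
    let r1 := pvConquer (xs.take mid)
    let r2 := pvConquer (xs.drop mid)
    (r1.1 + r2.1, r1.2 * r2.2)
termination_by xs => xs.length
decreasing_by
  · simp [List.length_take]; omega
  · simp [List.length_drop]; omega

def calculate_even_sum_odd_product_alt (numbers : List Int) : Int × Int :=
  pvConquer numbers

-- ===== PRECONDITION & SPEC =====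
def Spec_calculate_even_sum_odd_product (numbers : List Int) (out : Int × Int) : Prop := out = calculate_even_sum_odd_product_alt numbers
instance (numbers : List Int) (out : Int × Int) : Decidable (Spec_calculate_even_sum_odd_product numbers out) := by unfold Spec_calculate_even_sum_odd_product; infer_instance

-- ===== CLAIM (what is proved, stated in full; the proofs are below) =====
def Claim_equal_calculate_even_sum_odd_product : Prop := ∀ (numbers : List Int), Dom_calculate_even_sum_odd_product numbers → Spec_calculate_even_sum_odd_product numbers (calculate_even_sum_odd_product numbers)

-- ===== LEMMAS AND PROOFS =====

lemma foldl_add_shift (ys : List Int) : ∀ s : Int,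
    ys.foldl (· + ·) s = s + ys.foldl (· + ·) 0 := by
  induction ys with
  | nil => simp
  | cons y ys ih =>
    intro s
    simp only [List.foldl_cons]
    rw [ih (s + y), ih (0 + y)]
    ring

lemma foldl_mul_shift (ys : List Int) : ∀ s : Int,
    ys.foldl (fun acc num => acc * num) s = s * ys.foldl (fun acc num => acc * num) 1 := by
  induction ys with
  | nil => simp
  | cons y ys ih =>
    intro s
    simp only [List.foldl_cons]
    rw [ih (s * y), ih (1 * y)]
    ring

-- The canonical value both programs compute.
def pvChar (xs : List Int) : Int × Int :=
  ((xs.filter (fun num => num % 2 == 0)).foldl (· + ·) 0,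
   (xs.filter (fun num => !(num % 2 == 0))).foldl (fun acc num => acc * num) 1)

lemma pvChar_append (xs ys : List Int) :
    pvChar (xs ++ ys) = ((pvChar xs).1 + (pvChar ys).1, (pvChar xs).2 * (pvChar ys).2) := by
  simp only [pvChar, List.filter_append, List.foldl_append]
  rw [foldl_add_shift, foldl_mul_shift]

lemma pymod2 (n : Int) : PySem.Int.mod n 2 = n % 2 :=
  PySem.Int.mod_eq_emod_of_pos (by norm_num)

theorem pvConquer_eq_char : (xs : List Int) → pvConquer xs = pvChar xs
  | [] => by simp [pvConquer, pvChar]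
  | [num] => by
    simp only [pvConquer, pymod2]
    by_cases h : (num % 2 == 0) = true <;> simp [pvChar, h, List.filter]
  | a :: b :: rest => by
    have h1 := pvConquer_eq_char ((a :: b :: rest).take ((a :: b :: rest).length / 2))
    have h2 := pvConquer_eq_char ((a :: b :: rest).drop ((a :: b :: rest).length / 2))
    simp only [pvConquer, h1, h2]
    conv_rhs => rw [← List.take_append_drop ((a :: b :: rest).length / 2) (a :: b :: rest)]
    rw [pvChar_append]
termination_by xs => xs.length
decreasing_by
  · simp [List.length_take]; omega
  · simp [List.length_drop]; omega

-- ===== VERDICT (by name: the statement is the Claim_ definition above) =====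
theorem calculate_even_sum_odd_product_spec : Claim_equal_calculate_even_sum_odd_product := by
  intro numbers _
  unfold Spec_calculate_even_sum_odd_product calculate_even_sum_odd_product
    calculate_even_sum_odd_product_alt
  rw [pvConquer_eq_char]
  simp only [pymod2, bne, pvChar, ne_eq, ite_not]
  by_cases hodd : numbers.filter (fun num => !(num % 2 == 0)) = []
  · simp [hodd]
  · simp [hodd]
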